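-- pv_equiv track=rewrite | github.com/johnttan/google-code-jam | 2014round1c/traincars/solve.py | check
-- ===== SOURCE A (Python) =====
-- def check(train):
--     train = ''.join(train)
--     checked = {}
--     current = ''
--     for letter in train:
--       if letter not in checked.keys():
--         checked[letter] = True
--         current = letter
--       # if not checked[letter] and letter != current:
--       #   checked[letter] = True
--       #   current = letter
--       elif checked[letter] and letter != current:
--         return False
--       elif checked[letter] and letter == current:
--         pass
--     return True
-- ===== SOURCE B (Python) =====
-- def check(train):
--     train = ''.join(train)
--     runs = []
--     for letter in train:
--         if not runs or runs[-1] != letter: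
--             runs.append(letter)
--     return len(runs) == len(set(runs))
-- ===== Notes on version B (the rewrite author's own statement) =====
-- stated objective: simpler
-- what changed: Replaces A's per-character state machine (a 'checked' dict plus 'current' tracker with three branches and an early return) by a two-phase decomposition: compress the string into its run-leader sequence, then return whether that sequence has no duplicate letter.
import Mathlib
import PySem

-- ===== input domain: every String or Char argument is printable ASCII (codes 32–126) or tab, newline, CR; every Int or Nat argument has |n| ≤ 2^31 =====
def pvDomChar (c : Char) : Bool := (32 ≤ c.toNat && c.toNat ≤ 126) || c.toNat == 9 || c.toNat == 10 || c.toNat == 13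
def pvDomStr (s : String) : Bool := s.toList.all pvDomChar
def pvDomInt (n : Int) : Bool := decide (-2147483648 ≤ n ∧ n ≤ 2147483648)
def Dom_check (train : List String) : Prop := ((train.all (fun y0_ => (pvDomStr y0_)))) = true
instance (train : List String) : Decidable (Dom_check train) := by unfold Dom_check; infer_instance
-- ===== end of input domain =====

-- B replaces A's single-pass state machine (dict + `current` with branching early return)
-- by a two-phase decomposition: compress into run-leaders, then test uniqueness (objective: simpler).

-- ===== PORT A =====
-- A's loop: `checked` dict, `current` letter (Python's initial '' is modelled as `none`),
-- branches in the same order as the Python (the final fall-through continues the loop).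
def checkLoop (checked : PySem.Dict Char Bool) (current : Option Char) :
    List Char → Bool
  | [] => true
  | c :: rest =>
    if ¬ (c ∈ checked.keys) then
      checkLoop (checked.insert c true) (some c) rest
    else if checked.getD c false && decide (some c ≠ current) then
      false
    else if checked.getD c false && decide (some c = current) then
      checkLoop checked current rest
    else
      checkLoop checked current rest

def check (train : List String) : Bool :=
  let s := PySem.Str.join "" train
  checkLoop PySem.Dict.empty none s.toList

-- ===== PORT B =====
-- one step of B's run-compression: append `letter` iff `not runs or runs[-1] != letter`
def runStep (runs : List Char) (c : Char) : List Char :=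
  if runs.isEmpty ∨ runs.getLast? ≠ some c then runs ++ [c] else runs

def check_alt (train : List String) : Bool :=
  let s := PySem.Str.join "" train
  let runs := s.toList.foldl runStep []
  decide (runs.length = (PySem.Set.ofList runs).length)

-- ===== PRECONDITION & SPEC =====
def Spec_check (train : List String) (out : Bool) : Prop := out = check_alt train
instance (train : List String) (out : Bool) : Decidable (Spec_check train out) := by unfold Spec_check; infer_instance

-- ===== CLAIM (what is proved, stated in full; the proofs are below) =====
def Claim_equal_check : Prop := ∀ (train : List String), Dom_check train → Spec_check train (check train)

-- ===== LEMMAS AND PROOFS =====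

-- the fold with Set.add only appends, so its result contains the accumulator as a sublist
theorem pv_foldl_add_sublist (l : List Char) :
    ∀ s : List Char, (l.foldl PySem.Set.add s).Sublist (s ++ l) := by
  induction l with
  | nil => intro s; simp
  | cons c l ih =>
    intro s
    have h := ih (PySem.Set.add s c)
    have hadd : (PySem.Set.add s c).Sublist (s ++ [c]) := by
      unfold PySem.Set.add
      split
      · exact (List.sublist_append_left s [c])
      · exact List.Sublist.refl _
    have h2 : (PySem.Set.add s c ++ l).Sublist (s ++ [c] ++ l) :=
      List.Sublist.append hadd (List.Sublist.refl l)
    have h3 : ((c :: l).foldl PySem.Set.add s).Sublist (s ++ [c] ++ l) :=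
      List.Sublist.trans h h2
    simpa using h3

theorem pv_ofList_len_iff_nodup (l : List Char) :
    (l.length = (PySem.Set.ofList l).length) ↔ l.Nodup := by
  constructor
  · intro h
    have hsub : (PySem.Set.ofList l).Sublist l := by
      have := pv_foldl_add_sublist l []
      simpa [PySem.Set.ofList_eq_foldl] using this
    have : PySem.Set.ofList l = l := hsub.eq_of_length h.symm
    have hn := PySem.Set.nodup_ofList (xs := l)
    rwa [this] at hn
  · intro h
    rw [PySem.Set.ofList_eq_self_of_nodup (xs := l) h]

-- runStep only ever appends, so an accumulator with a duplicate stays duplicated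
theorem pv_runStep_sublist (rest : List Char) :
    ∀ runs : List Char, runs.Sublist (rest.foldl runStep runs) := by
  induction rest with
  | nil => intro runs; simp
  | cons c rest ih =>
    intro runs
    have h1 : runs.Sublist (runStep runs c) := by
      unfold runStep; split
      · exact List.sublist_append_left runs [c]
      · exact List.Sublist.refl _
    exact h1.trans (ih (runStep runs c))

-- the key invariant: A's state machine agrees with "the run list built so far stays Nodup"
theorem pv_loop_eq (rest : List Char) :
    ∀ (checked : PySem.Dict Char Bool) (cur : Option Char) (runs : List Char),
      (∀ c, c ∈ checked.keys ↔ c ∈ runs) →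
      (∀ c, c ∈ checked.keys → checked.getD c false = true) →
      runs.getLast? = cur →
      runs.Nodup →
      checkLoop checked cur rest = decide ((rest.foldl runStep runs).Nodup) := by
  induction rest with
  | nil =>
    intro checked cur runs hmem hval hlast hnd
    simp [checkLoop, hnd]
  | cons c rest ih =>
    intro checked cur runs hmem hval hlast hnd
    by_cases hc : c ∈ checked.keys
    · have hcr : c ∈ runs := (hmem c).1 hc
      have hv : checked.getD c false = true := hval c hc
      by_cases hcur : some c = cur
      · -- same as current letter: both sides skip
        have hkeep : runStep runs c = runs := by
          unfold runStep
          have hne : ¬ runs.isEmpty := by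
            intro h; rw [List.isEmpty_iff] at h; subst h; simp at hcr
          have : runs.getLast? = some c := by rw [hlast, ← hcur]
          simp [hne, this]
        have := ih checked cur runs hmem hval hlast hnd
        simp only [checkLoop, hc, hv, hcur, List.foldl_cons, hkeep]
        simpa [hcur] using this
      · -- repeated letter, not current: A returns False, B's runs gain a duplicate
        have happ : runStep runs c = runs ++ [c] := by
          unfold runStep
          have : runs.getLast? ≠ some c := by rw [hlast]; exact fun h => hcur h.symm
          simp [this]
        have hdup : ¬ (runs ++ [c]).Nodup := by
          simp [List.nodup_append, hcr]
        have hdup' : ¬ (rest.foldl runStep (runs ++ [c])).Nodup := by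
          intro h
          exact hdup (h.sublist (pv_runStep_sublist rest (runs ++ [c])))
        simp only [checkLoop, hc, hv, hcur, List.foldl_cons, happ]
        simp [hcur, hdup']
    · -- fresh letter: A inserts, B appends a new run-leader
      have hcr : c ∉ runs := fun h => hc ((hmem c).2 h)
      have happ : runStep runs c = runs ++ [c] := by
        unfold runStep
        have : runs.getLast? ≠ some c := by
          intro h; exact hcr (List.mem_of_getLast? h)
        simp [this]
      have hmem' : ∀ x, x ∈ (checked.insert c true).keys ↔ x ∈ runs ++ [c] := by
        intro x
        rw [PySem.Dict.mem_keys_insert]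
        simp [hmem x, or_comm]
      have hval' : ∀ x, x ∈ (checked.insert c true).keys →
          (checked.insert c true).getD x false = true := by
        intro x hx
        rw [PySem.Dict.getD_insert]
        split
        · rfl
        · rename_i hxc
          rw [PySem.Dict.mem_keys_insert] at hx
          exact hval x (hx.resolve_left hxc)
      have hlast' : (runs ++ [c]).getLast? = some c := by simp
      have hnd' : (runs ++ [c]).Nodup := by
        simp [List.nodup_append, hnd]
        exact fun a ha h => hcr (h ▸ ha)
      have := ih (checked.insert c true) (some c) (runs ++ [c]) hmem' hval' hlast' hnd'
      simp only [checkLoop, hc, List.foldl_cons, happ]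
      simpa using this

-- ===== VERDICT (by name: the statement is the Claim_ definition above) =====
theorem check_spec : Claim_equal_check := by
  intro train _
  unfold Spec_check check check_alt
  have h := pv_loop_eq (PySem.Str.join "" train).toList PySem.Dict.empty none []
    (by simp [PySem.Dict.keys_empty]) (by simp [PySem.Dict.keys_empty]) (by simp) (by simp)
  simp only [h]
  rw [decide_eq_decide]
  exact (pv_ofList_len_iff_nodup _).symm
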